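-- pv_equiv track=rewrite | github.com/pypi-data/pypi-mirror-359 | packages/scrive/scrive-0.2.0.tar.gz/scrive-0.2.0/scrive/core.py | _is_simple_pattern
-- ===== SOURCE A (Python) =====
-- def _is_simple_pattern(pattern: str) -> bool:
--     """Check if a pattern is simple enough for further optimization."""
--     # Patterns with these constructs should not be recursively optimized
--     complex_constructs = [
--         "(?:",
--         "(?=",
--         "(?!",
--         "(?<=",
--         "(?<!",
--         "{",
--         "}",
--         "+",
--         "*",
--         "?",
--     ]
--     return not any(construct in pattern for construct in complex_constructs)
-- ===== SOURCE B (Python) =====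
-- _FORBIDDEN = frozenset("{}+*?")
--
--
-- def _is_simple_pattern(pattern: str) -> bool:
--     """Check if a pattern is simple enough for further optimization."""
--     # Every complex construct contains one of these characters, so one
--     # character-level scan suffices.
--     return all(c not in _FORBIDDEN for c in pattern)
-- ===== Notes on version B (the rewrite author's own statement) =====
-- stated objective: simpler
-- what changed: Replaces ten substring-containment scans over the pattern with a single character-level pass against the set of five forbidden single characters, which subsumes every multi-character construct since each contains a question mark.
import Mathlib
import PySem

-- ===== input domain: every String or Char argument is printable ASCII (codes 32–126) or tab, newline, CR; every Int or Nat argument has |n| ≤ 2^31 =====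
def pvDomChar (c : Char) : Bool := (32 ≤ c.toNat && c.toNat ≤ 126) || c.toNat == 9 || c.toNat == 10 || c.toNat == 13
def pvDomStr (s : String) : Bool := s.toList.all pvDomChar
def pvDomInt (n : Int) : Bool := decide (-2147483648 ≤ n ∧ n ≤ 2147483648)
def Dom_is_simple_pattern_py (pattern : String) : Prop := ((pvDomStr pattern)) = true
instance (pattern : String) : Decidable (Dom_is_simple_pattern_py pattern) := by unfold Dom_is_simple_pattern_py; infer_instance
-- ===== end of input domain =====

-- B replaces the ten substring scans of A with one character-level pass
-- against the five forbidden characters (objective: simpler).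

-- ===== PORT A =====
def is_simple_pattern_py (pattern : String) : Bool :=
  let complex_constructs : List String :=
    ["(?:", "(?=", "(?!", "(?<=", "(?<!", "{", "}", "+", "*", "?"]
  !(complex_constructs.any (fun construct => PySem.Str.isIn construct pattern))

-- ===== PORT B =====
def is_simple_pattern_py_alt (pattern : String) : Bool :=
  pattern.toList.all (fun c => !(['{', '}', '+', '*', '?'].contains c))

-- ===== PRECONDITION & SPEC =====
def Spec_is_simple_pattern_py (pattern : String) (out : Bool) : Prop := out = is_simple_pattern_py_alt pattern
instance (pattern : String) (out : Bool) : Decidable (Spec_is_simple_pattern_py pattern out) := by unfold Spec_is_simple_pattern_py; infer_instance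

-- ===== CLAIM (what is proved, stated in full; the proofs are below) =====
def Claim_equal_is_simple_pattern_py : Prop := ∀ (pattern : String), Dom_is_simple_pattern_py pattern → Spec_is_simple_pattern_py pattern (is_simple_pattern_py pattern)

-- ===== LEMMAS AND PROOFS =====

theorem pv_singleton_infix_of_mem {c : Char} {l : List Char} (h : c ∈ l) :
    [c] <:+: l := by
  obtain ⟨s, t, rfl⟩ := List.append_of_mem h
  exact ⟨s, t, by simp⟩

theorem pv_ab_eq (pattern : String) :
    is_simple_pattern_py pattern = is_simple_pattern_py_alt pattern := by
  unfold is_simple_pattern_py is_simple_pattern_py_alt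
  rw [List.all_eq_not_any_not]
  simp only [Bool.not_not]
  congr 1
  rw [Bool.eq_iff_iff]
  simp only [List.any_cons, List.any_nil, Bool.or_false, Bool.or_eq_true,
    PySem.Str.isIn_iff_infix, List.any_eq_true, List.contains_eq_mem,
    decide_eq_true_eq]
  constructor
  · rintro (h | h | h | h | h | h | h | h | h | h)
    · exact ⟨'?', h.subset (by decide), by decide⟩
    · exact ⟨'?', h.subset (by decide), by decide⟩
    · exact ⟨'?', h.subset (by decide), by decide⟩
    · exact ⟨'?', h.subset (by decide), by decide⟩
    · exact ⟨'?', h.subset (by decide), by decide⟩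
    · exact ⟨'{', h.subset (by decide), by decide⟩
    · exact ⟨'}', h.subset (by decide), by decide⟩
    · exact ⟨'+', h.subset (by decide), by decide⟩
    · exact ⟨'*', h.subset (by decide), by decide⟩
    · exact ⟨'?', h.subset (by decide), by decide⟩
  · rintro ⟨c, hc, hf⟩
    have hi := pv_singleton_infix_of_mem hc
    fin_cases hf
    · exact Or.inr (Or.inr (Or.inr (Or.inr (Or.inr (Or.inl hi)))))
    · exact Or.inr (Or.inr (Or.inr (Or.inr (Or.inr (Or.inr (Or.inl hi))))))
    · exact Or.inr (Or.inr (Or.inr (Or.inr (Or.inr (Or.inr (Or.inr (Or.inl hi)))))))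
    · exact Or.inr (Or.inr (Or.inr (Or.inr (Or.inr (Or.inr (Or.inr (Or.inr (Or.inl hi))))))))
    · exact Or.inr (Or.inr (Or.inr (Or.inr (Or.inr (Or.inr (Or.inr (Or.inr (Or.inr hi))))))))

-- ===== VERDICT (by name: the statement is the Claim_ definition above) =====
theorem is_simple_pattern_py_spec : Claim_equal_is_simple_pattern_py := by
  intro pattern _
  exact pv_ab_eq pattern
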